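-- pv_equiv track=rewrite | github.com/Safaet-Rabbi/Python | Codeforce/1073B.py | vasya_and_books
-- ===== SOURCE A (Python) =====
-- def vasya_and_books(n, a, b):
--     position = {book: i for i, book in enumerate(a)}
--     max_position_removed = -1
--
--     result = []
--
--     for book in b:
--         if position[book] > max_position_removed:
--             books_to_move = position[book] - max_position_removed
--             result.append(books_to_move)
--             max_position_removed = position[book]
--         else:
--             result.append(0)
--
--     return result
-- ===== SOURCE B (Python) =====
-- def vasya_and_books(n, a, b):
--     removed = set()
--     ptr = 0
--     result = []
--     for book in b:
--         if book in removed: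
--             result.append(0)
--         else:
--             count = 0
--             while True:
--                 cur = a[ptr]
--                 removed.add(cur)
--                 ptr += 1
--                 count += 1
--                 if cur == book:
--                     break
--             result.append(count)
--     return result
-- ===== Notes on version B (the rewrite author's own statement) =====
-- stated objective: alternative
-- what changed: B physically simulates the stack with a pointer and a removed-set instead of A's position-dictionary with a running maximum; Pre_ restricts to the natural domain (distinct stack entries, every query present in the stack), outside which A raises KeyError or its last-occurrence dict arithmetic is accidental.
-- outside the precondition, e.g. on vasya_and_books(2, [1, 1], [1]): A returns [2], B returns [1]
import Mathlib
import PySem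

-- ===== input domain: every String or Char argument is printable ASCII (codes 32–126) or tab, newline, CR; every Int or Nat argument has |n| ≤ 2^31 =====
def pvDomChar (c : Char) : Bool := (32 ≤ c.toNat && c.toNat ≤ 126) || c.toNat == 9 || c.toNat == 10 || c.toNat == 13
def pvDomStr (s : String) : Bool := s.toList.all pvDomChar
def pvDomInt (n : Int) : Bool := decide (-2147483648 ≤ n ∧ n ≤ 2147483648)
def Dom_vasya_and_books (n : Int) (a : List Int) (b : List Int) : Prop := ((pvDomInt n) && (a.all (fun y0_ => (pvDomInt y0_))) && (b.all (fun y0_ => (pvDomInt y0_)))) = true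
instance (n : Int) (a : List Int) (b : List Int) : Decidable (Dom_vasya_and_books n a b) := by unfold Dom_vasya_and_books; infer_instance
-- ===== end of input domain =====

-- B replaces A's position-dictionary + running-maximum arithmetic by a physical simulation of the
-- stack (a pointer walking the stack plus a removed-set); equivalence is claimed on the natural
-- domain stated by Pre_ (distinct stack entries, every queried book on the stack).

-- ===== PORT A =====
def vasya_and_books (_n : Int) (a : List Int) (b : List Int) : List Int :=
  let position : PySem.Dict Int Int :=
    (PySem.List.enumerate a 0).foldl (fun d p => d.insert p.2 p.1) PySem.Dict.empty
  (b.foldl (fun (s : Int × List Int) book =>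
      -- Python raises KeyError when book ∉ a; those inputs are excluded by Pre_
      let pos := (position.get? book).getD 0
      if pos > s.1 then (pos, s.2 ++ [pos - s.1]) else (s.1, s.2 ++ [0]))
    (-1, [])).2

-- ===== PORT B =====
-- B's pointer `ptr` into `a` is represented by the not-yet-read suffix of `a`; the inner
-- `while True` loop is `pvPopUntil`.  Python raises IndexError when the suffix runs out
-- (queried book not on the stack); those inputs are excluded by Pre_.
def pvPopUntil (book : Int) : List Int → List Int → Int → Int × List Int × List Int
  | [], removed, c => (c, [], removed)
  | cur :: rest, removed, c =>
      let removed' := PySem.Set.add removed cur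
      if cur == book then (c + 1, rest, removed')
      else pvPopUntil book rest removed' (c + 1)

def vasya_and_books_alt (_n : Int) (a : List Int) (b : List Int) : List Int :=
  (b.foldl (fun (s : List Int × List Int × List Int) book =>
      if PySem.Set.contains s.2.1 book then (s.1, s.2.1, s.2.2 ++ [0])
      else
        let r := pvPopUntil book s.1 s.2.1 0
        (r.2.1, r.2.2, s.2.2 ++ [r.1]))
    (a, PySem.Set.empty, [])).2.2

-- ===== PRECONDITION & SPEC =====
-- Pre_ restricts to the task's natural domain: the stack holds distinct books and every queried
-- book is on the stack.  Outside it A raises KeyError (book ∉ a; B raises IndexError there), and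
-- on a duplicated stack A's last-occurrence dict arithmetic is accidental and B's first-occurrence
-- simulation differs (see cites).
def Pre_vasya_and_books (n : Int) (a : List Int) (b : List Int) : Prop :=
  a.Nodup ∧ ∀ x ∈ b, x ∈ a
instance (n : Int) (a : List Int) (b : List Int) : Decidable (Pre_vasya_and_books n a b) := by
  unfold Pre_vasya_and_books; infer_instance

def pvWitness_vasya_and_books : Int × List Int × List Int := (3, [1, 3, 2], [2, 1, 3])

def Spec_vasya_and_books (n : Int) (a : List Int) (b : List Int) (out : List Int) : Prop :=
  out = vasya_and_books_alt n a b
instance (n : Int) (a : List Int) (b : List Int) (out : List Int) :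
    Decidable (Spec_vasya_and_books n a b out) := by unfold Spec_vasya_and_books; infer_instance

-- ===== CLAIM (what is proved, stated in full; the proofs are below) =====
def Claim_equal_vasya_and_books : Prop :=
  ∀ (n : Int) (a : List Int) (b : List Int), Dom_vasya_and_books n a b →
    Pre_vasya_and_books n a b → Spec_vasya_and_books n a b (vasya_and_books n a b)

-- ===== LEMMAS AND PROOFS =====

-- A's position dictionary looks up the (unique, by Nodup) index of a book.
lemma pv_dict_lookup (book : Int) :
    ∀ (a : List Int), a.Nodup → ∀ (s : Int) (d : PySem.Dict Int Int),
      ((PySem.List.enumerate a s).foldl (fun d p => d.insert p.2 p.1) d).get? book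
        = if book ∈ a then some ((a.idxOf book : Int) + s) else d.get? book := by
  intro a
  induction a with
  | nil => intro _ s d; simp [PySem.List.enumerate]
  | cons x t ih =>
    intro hnd s d
    rw [show PySem.List.enumerate (x :: t) s = (s, x) :: PySem.List.enumerate t (s + 1) from rfl,
      List.foldl_cons]
    rw [ih hnd.of_cons (s + 1) (d.insert x s)]
    by_cases hbx : book = x
    · subst hbx
      have hbt : book ∉ t := (List.nodup_cons.mp hnd).1
      simp [hbt, List.idxOf_cons_self, PySem.Dict.get?_insert_self]
    · by_cases hbt : book ∈ t
      · simp only [hbt, if_true, List.mem_cons, hbx, false_or,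
          List.idxOf_cons_ne _ (by simpa using Ne.symm hbx)]
        congr 1
        push_cast
        ring
      · rw [if_neg hbt, if_neg (by simp [hbx, hbt]),
          PySem.Dict.get?_insert_of_ne _ _ hbx]

-- B's inner while-loop, on a duplicate-free suffix disjoint from the removed-set,
-- pops exactly up to the first occurrence of `book`.
lemma pv_popUntil_spec (book : Int) :
    ∀ (stack removed : List Int) (c : Int), stack.Nodup → (∀ x ∈ stack, x ∉ removed) →
      book ∈ stack →
      pvPopUntil book stack removed c
        = (c + (stack.idxOf book : Int) + 1,
           stack.drop (stack.idxOf book + 1),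
           removed ++ stack.take (stack.idxOf book + 1)) := by
  intro stack
  induction stack with
  | nil => intro _ _ _ _ h; simp at h
  | cons cur rest ih =>
    intro removed c hnd hdis hmem
    rw [pvPopUntil]
    have hadd : PySem.Set.add removed cur = removed ++ [cur] := by
      simp [PySem.Set.add, PySem.Set.contains, hdis cur (List.mem_cons_self ..)]
    by_cases h : cur = book
    · subst h
      simp [List.idxOf_cons_self, hadd]
    · have hbm : book ∈ rest := (List.mem_cons.mp hmem).resolve_left (fun e => h e.symm)
      rw [if_neg (by simp [h]), hadd,
        ih (removed ++ [cur]) (c + 1) hnd.of_cons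
          (fun x hx => by
            simp only [List.mem_append, List.mem_singleton]
            rintro (hr | rfl)
            · exact hdis x (List.mem_cons_of_mem _ hx) hr
            · exact (List.nodup_cons.mp hnd).1 hx) hbm]
      rw [List.idxOf_cons_ne _ h]
      refine Prod.ext ?_ (Prod.ext ?_ ?_) <;> simp [List.take_succ_cons]
      · ring

lemma pv_mem_take_iff (a : List Int) (x : Int) (hmem : x ∈ a) :
    ∀ k, x ∈ a.take k ↔ a.idxOf x < k := by
  induction a with
  | nil => simp at hmem
  | cons y t ih =>
    intro k
    cases k with
    | zero => simp
    | succ k =>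
      by_cases h : x = y
      · subst h; simp [List.idxOf_cons_self]
      · rw [List.take_succ_cons, List.mem_cons, List.idxOf_cons_ne _ (by simpa using Ne.symm h)]
        simp only [List.mem_cons] at hmem
        simp [h, ih (hmem.resolve_left h) k]

lemma pv_idxOf_drop (a : List Int) (x : Int) (k : Nat) (hk : k ≤ a.length) (hx : x ∉ a.take k) :
    a.idxOf x = k + (a.drop k).idxOf x := by
  conv_lhs => rw [← List.take_append_drop k a]
  rw [List.idxOf_append_of_notMem hx, List.length_take, Nat.min_eq_left hk]

-- Loop invariant: after some prefix of the queries, A's running maximum is k - 1 exactly when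
-- B's pointer has consumed a.take k (the removed-set) and a.drop k is still on the stack.
lemma pv_main (a : List Int) (ha : a.Nodup) :
    ∀ (b : List Int), (∀ x ∈ b, x ∈ a) → ∀ (k : Nat), k ≤ a.length → ∀ (res : List Int),
      (b.foldl (fun (s : Int × List Int) book =>
          let pos := (((PySem.List.enumerate a 0).foldl (fun d p => d.insert p.2 p.1) PySem.Dict.empty).get? book).getD 0
          if pos > s.1 then (pos, s.2 ++ [pos - s.1]) else (s.1, s.2 ++ [0]))
        ((k : Int) - 1, res)).2
      = (b.foldl (fun (s : List Int × List Int × List Int) book =>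
          if PySem.Set.contains s.2.1 book then (s.1, s.2.1, s.2.2 ++ [0])
          else
            let r := pvPopUntil book s.1 s.2.1 0
            (r.2.1, r.2.2, s.2.2 ++ [r.1]))
        (a.drop k, a.take k, res)).2.2 := by
  intro b
  induction b with
  | nil => intro _ _ _ _; rfl
  | cons book bs ih =>
    intro hb k hk res
    have hmem : book ∈ a := hb book (List.mem_cons_self ..)
    have hpos : (((PySem.List.enumerate a 0).foldl (fun d p => d.insert p.2 p.1) PySem.Dict.empty).get? book).getD 0
        = ((a.idxOf book : Nat) : Int) := by
      rw [pv_dict_lookup book a ha 0 PySem.Dict.empty, if_pos hmem]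
      simp
    rw [List.foldl_cons, List.foldl_cons]
    simp only [hpos]
    by_cases hin : book ∈ a.take k
    · have hlt : a.idxOf book < k := (pv_mem_take_iff a book hmem k).mp hin
      rw [if_neg (by omega)]
      rw [if_pos (by simpa [PySem.Set.contains] using hin)]
      exact ih (fun x hx => hb x (List.mem_cons_of_mem _ hx)) k hk (res ++ [0])
    · have hge : k ≤ a.idxOf book := by
        by_contra hlt
        exact hin ((pv_mem_take_iff a book hmem k).mpr (by omega))
      have hidx : a.idxOf book = k + (a.drop k).idxOf book := pv_idxOf_drop a book k hk hin
      have hmemd : book ∈ a.drop k := by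
        rcases List.mem_append.mp (by rw [List.take_append_drop]; exact hmem :
            book ∈ a.take k ++ a.drop k) with h | h
        · exact absurd h hin
        · exact h
      have hnd : (a.take k ++ a.drop k).Nodup := by rw [List.take_append_drop]; exact ha
      have hdis := (List.nodup_append.mp hnd).2.2
      rw [if_pos (by omega)]
      rw [if_neg (by simpa [PySem.Set.contains] using hin)]
      rw [pv_popUntil_spec book (a.drop k) (a.take k) 0
            ((List.nodup_append.mp hnd).2.1)
            (fun x hx hx' => hdis x hx' x hx rfl) hmemd]
      have hlen : a.idxOf book < a.length := List.idxOf_lt_length_of_mem hmem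
      have e1 : (a.drop k).drop ((a.drop k).idxOf book + 1) = a.drop (a.idxOf book + 1) := by
        rw [List.drop_drop]; congr 1; omega
      have e2 : a.take k ++ (a.drop k).take ((a.drop k).idxOf book + 1) = a.take (a.idxOf book + 1) := by
        rw [hidx, Nat.add_assoc]
        conv_rhs => rw [List.take_add]
      have e3 : (0 : Int) + ((a.drop k).idxOf book : Int) + 1
          = ((a.idxOf book : Nat) : Int) - ((k : Int) - 1) := by
        push_cast [hidx]; ring
      rw [e1, e2, e3]
      have := ih (fun x hx => hb x (List.mem_cons_of_mem _ hx)) (a.idxOf book + 1) (by omega)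
        (res ++ [((a.idxOf book : Nat) : Int) - ((k : Int) - 1)])
      simpa using this

-- ===== VERDICT (by name: the statement is the Claim_ definition above) =====
theorem vasya_and_books_spec : Claim_equal_vasya_and_books := by
  intro n a b _ hpre
  obtain ⟨ha, hb⟩ := hpre
  unfold Spec_vasya_and_books
  have h := pv_main a ha b hb 0 (Nat.zero_le _) []
  simpa [vasya_and_books, vasya_and_books_alt, PySem.Set.empty] using h
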